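-- pv_equiv track=rewrite | github.com/sooo19/coding-test-study | [python] 프로그래머스/[완전탐색]모의고사(정답코드).py | solution
-- ===== SOURCE A (Python) =====
-- def solution(answers):
--     answer = []
--
--     total = []  # 모든 학생의 정답을 저장
--     # 각 학생이 찍는 패턴을 기록
--     s1 = [1, 2, 3, 4, 5]
--     s2 = [2, 1, 2, 3, 2, 4, 2, 5]
--     s3 = [3, 3, 1, 1, 2, 2, 4, 4, 5, 5]
--     total.append(s1)
--     total.append(s2)
--     total.append(s3)
--
--     count = [0]*len(total)      # 학생 인원 수 만큼 count 배열 생성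
--     for i in range(len(total)):     # s1, s2, s3의 정답을 모두 맞춰봄
--         for j in range(len(answers)):    # 학생의 정답 패턴의 한 구간의 길이 재기
--             k = j%len(total[i])     # 학생의 정답 패턴 길이로 해당 자리를 나눈 나머지
--             if total[i][k] == answers[j]:    # 학생의 해당 번째 요소 정답과 answers의 해당 위치 값이 같으면 정답으로 인정
--                 count[i] += 1
--
--     max_count = max(count)       # 정답을 가장 많이 맞춘 학생의 정답 개수를 구함
--     for i in range(len(count)):
--         if count[i] == max_count:
--             answer.append(i+1)
--
--
--     return answer
-- ===== SOURCE B (Python) =====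
-- def solution(answers):
--     # The three guessing patterns repeat with periods 5, 8 and 10, whose lcm is 40,
--     # so an answer's position matters only mod 40.  Build one histogram of
--     # (position mod 40, value) pairs in a single pass; each student's score is then
--     # a sum of 40 histogram lookups -- no per-answer comparison against the patterns.
--     cnt = {}
--     for i, a in enumerate(answers):
--         key = (i % 40, a)
--         cnt[key] = cnt.get(key, 0) + 1
--     patterns = [[1, 2, 3, 4, 5],
--                 [2, 1, 2, 3, 2, 4, 2, 5],
--                 [3, 3, 1, 1, 2, 2, 4, 4, 5, 5]]
--     counts = [sum(cnt.get((r, p[r % len(p)]), 0) for r in range(40)) for p in patterns]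
--     best = max(counts)
--     return [k + 1 for k, c in enumerate(counts) if c == best]
-- ===== Notes on version B (the rewrite author's own statement) =====
-- stated objective: alternative
-- what changed: Instead of comparing every answer against each of the three modulo-indexed patterns, B builds one histogram of (position mod 40, value) pairs in a single pass (40 = lcm of the pattern periods 5, 8, 10) and computes each student's score as a sum of 40 histogram lookups of the expected value at each residue.
import Mathlib
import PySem

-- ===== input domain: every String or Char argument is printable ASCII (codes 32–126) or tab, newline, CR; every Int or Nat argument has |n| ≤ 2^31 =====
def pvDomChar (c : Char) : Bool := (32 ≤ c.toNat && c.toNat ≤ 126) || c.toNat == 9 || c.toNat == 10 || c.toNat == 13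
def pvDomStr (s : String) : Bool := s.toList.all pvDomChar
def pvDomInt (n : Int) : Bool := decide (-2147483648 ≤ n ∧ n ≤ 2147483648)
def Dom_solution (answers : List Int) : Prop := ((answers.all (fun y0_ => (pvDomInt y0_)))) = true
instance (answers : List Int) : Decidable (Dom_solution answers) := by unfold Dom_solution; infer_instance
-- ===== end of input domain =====

set_option maxRecDepth 4000


-- B replaces A's per-answer comparisons against three modulo-indexed patterns by a single
-- histogram of (position mod 40, value) pairs (40 = lcm of the pattern periods) and 40
-- dictionary lookups per pattern (alternative algorithm; same asymptotic cost).

-- ===== PORT A =====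
-- Indices j and k are always in range, so answers[j] / total[i][k] are ported with getD
-- (exact here); j % len(p) on nonnegative ints coincides with Nat %.
def solution (answers : List Int) : List Int :=
  let s1 : List Int := [1, 2, 3, 4, 5]
  let s2 : List Int := [2, 1, 2, 3, 2, 4, 2, 5]
  let s3 : List Int := [3, 3, 1, 1, 2, 2, 4, 4, 5, 5]
  let total : List (List Int) := [s1, s2, s3]
  let count :=
    (List.range total.length).foldl (fun count i =>
      (List.range answers.length).foldl (fun count j =>
        let p := total.getD i []
        let k := j % p.length
        if p.getD k 0 == answers.getD j 0 then count.set i (count.getD i 0 + 1) else count)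
        count)
      (List.replicate total.length (0 : Int))
  let max_count := (PySem.List.max? count (fun x => x)).getD 0   -- max(count); count is nonempty
  (List.range count.length).foldl (fun answer i =>
    if count.getD i 0 == max_count then answer ++ [(i : Int) + 1] else answer) []

-- ===== PORT B =====
-- cnt[key] = cnt.get(key, 0) + 1 over enumerate(answers) is the Dict.modify counter fold;
-- i % 40 and r % len(p) on nonnegative ints are PySem.Int.mod; p[...] in range is pyGetD.
def solution_alt (answers : List Int) : List Int :=
  let cnt :=
    (PySem.List.enumerate answers 0).foldl
      (fun d ia => d.modify (PySem.Int.mod ia.1 40, ia.2) 0 (fun c => c + 1))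
      (PySem.Dict.empty : PySem.Dict (Int × Int) Int)
  let patterns : List (List Int) :=
    [[1, 2, 3, 4, 5], [2, 1, 2, 3, 2, 4, 2, 5], [3, 3, 1, 1, 2, 2, 4, 4, 5, 5]]
  let counts := patterns.map (fun p =>
    ((PySem.List.pyRange 0 40 1).map (fun r =>
      cnt.getD (r, PySem.List.pyGetD p (PySem.Int.mod r (p.length : Int)) 0) 0)).sum)
  let best := (PySem.List.max? counts (fun x => x)).getD 0   -- max(counts); counts is nonempty
  ((PySem.List.enumerate counts 0).filter (fun ic => ic.2 == best)).map (fun ic => ic.1 + 1)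

-- ===== PRECONDITION & SPEC =====
def Spec_solution (answers : List Int) (out : List Int) : Prop := out = solution_alt answers
instance (answers : List Int) (out : List Int) : Decidable (Spec_solution answers out) := by unfold Spec_solution; infer_instance

-- ===== CLAIM =====
def Claim_equal_solution : Prop := ∀ (answers : List Int), Dom_solution answers → Spec_solution answers (solution answers)

-- ===== LEMMAS AND PROOFS =====

-- what A's inner loop computes for pattern p over the first n answers
def sumInd (p ans : List Int) (n : Nat) : Int :=
  ∑ j ∈ Finset.range n, (if p.getD (j % p.length) 0 == ans.getD j 0 then (1 : Int) else 0)

-- A's inner loop over range n with list-set updates only touches index i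
lemma inner_fold (cond : Nat → Bool) :
    ∀ (n : Nat) (cnt : List Int) (i : Nat), i < cnt.length →
      (List.range n).foldl
          (fun c j => if cond j then c.set i (c.getD i 0 + 1) else c) cnt
        = cnt.set i (cnt.getD i 0 + ∑ j ∈ Finset.range n, (if cond j then (1 : Int) else 0)) := by
  intro n
  induction n with
  | zero =>
    intro cnt i hi
    rw [List.getD_eq_getElem _ _ hi]
    simp [List.set_getElem_self hi]
  | succ n ih =>
    intro cnt i hi
    rw [List.range_succ, List.foldl_append, ih cnt i hi, Finset.sum_range_succ]
    simp only [List.foldl_cons, List.foldl_nil]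
    by_cases hc : cond n
    · have hlen : i < (cnt.set i (cnt.getD i 0 + ∑ j ∈ Finset.range n, (if cond j then (1:Int) else 0))).length := by
        simpa using hi
      rw [if_pos hc, List.getD_eq_getElem _ _ hlen, List.getElem_set_self, List.set_set]
      simp [hc, add_assoc]
    · simp [hc]

-- A's count foldl computes exactly the three per-pattern match sums
lemma count_fold (ans : List Int) :
    (List.foldl (fun count i =>
        List.foldl (fun count j =>
            if (([[1, 2, 3, 4, 5], [2, 1, 2, 3, 2, 4, 2, 5],
                    [3, 3, 1, 1, 2, 2, 4, 4, 5, 5]] : List (List Int)).getD i []).getD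
                  (j % (([[1, 2, 3, 4, 5], [2, 1, 2, 3, 2, 4, 2, 5],
                          [3, 3, 1, 1, 2, 2, 4, 4, 5, 5]] : List (List Int)).getD i []).length) 0
                == ans.getD j 0
            then count.set i (count.getD i 0 + 1) else count)
          count (List.range ans.length))
        (List.replicate (0 + 1 + 1 + 1) (0 : Int)) (List.range (0 + 1 + 1 + 1)))
      = [sumInd [1, 2, 3, 4, 5] ans ans.length,
         sumInd [2, 1, 2, 3, 2, 4, 2, 5] ans ans.length,
         sumInd [3, 3, 1, 1, 2, 2, 4, 4, 5, 5] ans ans.length] := by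
  rw [show List.range (0 + 1 + 1 + 1) = [0, 1, 2] from rfl,
    show List.replicate (0 + 1 + 1 + 1) (0 : Int) = [0, 0, 0] from rfl]
  simp only [List.foldl_cons, List.foldl_nil, List.getD_cons_zero, List.getD_cons_succ]
  rw [inner_fold _ ans.length [0, 0, 0] 0 (by decide)]
  rw [inner_fold _ ans.length _ 1 (by simp)]
  rw [inner_fold _ ans.length _ 2 (by simp)]
  simp [sumInd, List.getD]

-- B's histogram keys for the answers, starting at position s
def keysOf (ans : List Int) (s : Int) : List (Int × Int) :=
  (PySem.List.enumerate ans s).map (fun ia => (PySem.Int.mod ia.1 40, ia.2))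

-- summing, over the 40 residues r, the histogram count of (r, expected value t r)
-- recovers the positional match sum against t
lemma count_keys (t : Nat → Int) :
    ∀ (ans : List Int) (s : Nat),
      (∑ r ∈ Finset.range 40, (List.count (((r : Nat) : Int), t r) (keysOf ans (s : Int)) : Int))
        = ∑ j ∈ Finset.range ans.length,
            (if t ((s + j) % 40) == ans.getD j 0 then (1 : Int) else 0) := by
  intro ans
  induction ans with
  | nil => intro s; simp [keysOf, PySem.List.enumerate_nil]
  | cons a rest ih =>
    intro s
    have hkey : PySem.Int.mod ((s : Nat) : Int) 40 = (((s % 40 : Nat)) : Int) := by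
      exact_mod_cast PySem.Int.mod_natCast s 40
    have hs1 : ((s : Nat) : Int) + 1 = (((s + 1 : Nat)) : Int) := by push_cast; ring
    have hstep : keysOf (a :: rest) (s : Int)
        = ((((s % 40 : Nat)) : Int), a) :: keysOf rest (((s : Nat) : Int) + 1) := by
      simp only [keysOf, PySem.List.enumerate_cons, List.map_cons, hkey]
    rw [hstep]
    simp only [List.count_cons, Nat.cast_add, Nat.cast_ite, Nat.cast_one, Nat.cast_zero]
    rw [Finset.sum_add_distrib, hs1, ih (s + 1)]
    have hhead : (∑ r ∈ Finset.range 40,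
        (if (((((s % 40 : Nat)) : Int), a) == (((r : Nat) : Int), t r)) then (1 : Int) else 0))
        = if t (s % 40) == a then (1 : Int) else 0 := by
      have hc : ∀ r ∈ Finset.range 40,
          (if (((((s % 40 : Nat)) : Int), a) == (((r : Nat) : Int), t r)) then (1 : Int) else 0)
            = if r = s % 40 then (if t (s % 40) == a then (1 : Int) else 0) else 0 := by
        intro r _
        by_cases h : r = s % 40
        · subst h
          by_cases h2 : a = t (s % 40)
          · simp [h2]
          · simp [h2, (show ¬(t (s % 40) = a) from fun e => h2 e.symm)]
        · have hne : ¬(((s % 40 : Nat) : Int) = ((r : Nat) : Int) ∧ a = t r) := by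
            rintro ⟨h1, -⟩
            exact h (by exact_mod_cast h1.symm)
          simp only [beq_iff_eq, Prod.ext_iff]
          rw [if_neg hne, if_neg h]
      rw [Finset.sum_congr rfl hc, Finset.sum_ite_eq' (Finset.range 40) (s % 40)]
      simp [Nat.mod_lt s (by norm_num : (0:Nat) < 40)]
    rw [hhead]
    rw [List.length_cons, Finset.sum_range_succ']
    have hc2 : ∀ j ∈ Finset.range rest.length,
        (if t ((s + (j + 1)) % 40) == (a :: rest).getD (j + 1) 0 then (1 : Int) else 0)
          = if t ((s + 1 + j) % 40) == rest.getD j 0 then (1 : Int) else 0 := by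
      intro j _
      have h3 : s + (j + 1) = s + 1 + j := by omega
      rw [h3, List.getD_cons_succ]
    rw [Finset.sum_congr rfl hc2]
    simp [add_comm]

lemma sum_map_range (n : Nat) (f : Nat → Int) :
    ((List.range n).map f).sum = ∑ i ∈ Finset.range n, f i := by
  rfl

-- B's per-pattern sum of 40 histogram lookups equals A's match sum, for each pattern
-- whose length divides 40
lemma bCount_eq (p ans : List Int) (hdvd : p.length ∣ 40) :
    ((PySem.List.pyRange 0 40 1).map (fun r =>
        ((PySem.List.enumerate ans 0).foldl
            (fun d ia => d.modify (PySem.Int.mod ia.1 40, ia.2) 0 (fun c => c + 1))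
            (PySem.Dict.empty : PySem.Dict (Int × Int) Int)).getD
          (r, PySem.List.pyGetD p (PySem.Int.mod r (p.length : Int)) 0) 0)).sum
      = sumInd p ans ans.length := by
  have hfold : ((PySem.List.enumerate ans 0).foldl
      (fun d ia => d.modify (PySem.Int.mod ia.1 40, ia.2) 0 (fun c => c + 1))
      (PySem.Dict.empty : PySem.Dict (Int × Int) Int))
      = (keysOf ans 0).foldl (fun d k => d.modify k 0 (fun c => c + 1))
        (PySem.Dict.empty : PySem.Dict (Int × Int) Int) := by
    rw [keysOf, List.foldl_map]
  have hcnt : ∀ x, ((keysOf ans 0).foldl (fun d k => d.modify k 0 (fun c => c + 1))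
      (PySem.Dict.empty : PySem.Dict (Int × Int) Int)).getD x 0
      = (List.count x (keysOf ans 0) : Int) := by
    intro x
    rw [PySem.Dict.getD_foldl_modify_add_one]
    simp [pysem]
  rw [PySem.List.pyRange_one, List.map_map]
  have hmapeq : ∀ k ∈ List.range ((40 : Int) - 0).toNat,
      ((fun r =>
          ((PySem.List.enumerate ans 0).foldl
              (fun d ia => d.modify (PySem.Int.mod ia.1 40, ia.2) 0 (fun c => c + 1))
              (PySem.Dict.empty : PySem.Dict (Int × Int) Int)).getD
            (r, PySem.List.pyGetD p (PySem.Int.mod r (p.length : Int)) 0) 0) ∘ (fun k : Nat => (0 : Int) + (k : Int))) k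
        = (List.count (((k : Nat) : Int), p.getD (k % p.length) 0) (keysOf ans 0) : Int) := by
    intro k _
    simp only [Function.comp_apply, zero_add, hfold, hcnt, PySem.Int.mod_natCast,
      PySem.List.pyGetD_natCast]
  rw [List.map_congr_left hmapeq]
  have h40 : ((40 : Int) - 0).toNat = 40 := rfl
  rw [h40, sum_map_range]
  have h0 : ((0 : Nat) : Int) = (0 : Int) := rfl
  have hck := count_keys (fun r => p.getD (r % p.length) 0) ans 0
  rw [h0] at hck
  rw [hck]
  unfold sumInd
  apply Finset.sum_congr rfl
  intro j _
  rw [Nat.zero_add, Nat.mod_mod_of_dvd j hdvd]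

-- final selection: fold over range 3 appending = enumerate-filter-map, for any counts/max
lemma final_select (c1 c2 c3 m : Int) :
    (List.range 3).foldl
        (fun answer i => if ([c1, c2, c3] : List Int).getD i 0 == m then answer ++ [(i : Int) + 1] else answer) []
      = ((PySem.List.enumerate ([c1, c2, c3] : List Int) 0).filter (fun ic => ic.2 == m)).map
          (fun ic => ic.1 + 1) := by
  show (List.foldl _ [] [0, 1, 2]) = _
  simp only [List.foldl_cons, List.foldl_nil, PySem.List.enumerate_cons,
    PySem.List.enumerate_nil, List.filter, List.getD_cons_zero, List.getD_cons_succ]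
  by_cases h1 : c1 == m <;> by_cases h2 : c2 == m <;> by_cases h3 : c3 == m <;>
    simp [h1, h2, h3]

-- ===== VERDICT =====
theorem solution_spec : Claim_equal_solution := by
  intro answers _
  unfold Spec_solution solution solution_alt
  simp only [List.length_cons, List.length_nil, List.map_cons, List.map_nil]
  simp only [count_fold answers]
  rw [show (0+1+1+1+1+1+1+1+1+1+1 : Nat) = List.length ([3,3,1,1,2,2,4,4,5,5] : List Int) from rfl,
    show (0+1+1+1+1+1+1+1+1 : Nat) = List.length ([2,1,2,3,2,4,2,5] : List Int) from rfl,
    show (0+1+1+1+1+1 : Nat) = List.length ([1,2,3,4,5] : List Int) from rfl]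
  rw [bCount_eq _ answers (by decide), bCount_eq _ answers (by decide),
    bCount_eq _ answers (by decide)]
  exact final_select _ _ _ _
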